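-- pv_equiv track=rewrite | github.com/revanth-rampal/dev-progress | Krish-Naik-DSA/EX-9_FloydsTriangle.py | generate_floyds_triangle
-- ===== SOURCE A (Python) =====
-- def generate_floyds_triangle(n):
--     """
--     Function to return the first n rows of Floyd's Triangle as a list of strings.
--
--     Parameters:
--     n (int): The number of rows in the triangle.
--
--     Returns:
--     list: A list of strings where each string represents a row of Floyd's Triangle
--     """
--     # Your code here
--     pattern = []
--     num = 1
--     for i in range(1, n + 1):
--         row = []
--         for j in range(i):
--             row.append(str(num))
--             num += 1
--         pattern.append(" ".join(row))
--     return pattern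
-- ===== SOURCE B (Python) =====
-- def generate_floyds_triangle(n):
--     pattern = []
--     for i in range(1, n + 1):
--         start = i * (i - 1) // 2 + 1
--         pattern.append(" ".join(str(x) for x in range(start, start + i)))
--     return pattern
-- ===== Notes on version B (the rewrite author's own statement) =====
-- stated objective: simpler
-- what changed: Each row's first value is computed directly from the closed-form triangular-number formula instead of carrying a running counter threaded across rows.
import Mathlib
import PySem

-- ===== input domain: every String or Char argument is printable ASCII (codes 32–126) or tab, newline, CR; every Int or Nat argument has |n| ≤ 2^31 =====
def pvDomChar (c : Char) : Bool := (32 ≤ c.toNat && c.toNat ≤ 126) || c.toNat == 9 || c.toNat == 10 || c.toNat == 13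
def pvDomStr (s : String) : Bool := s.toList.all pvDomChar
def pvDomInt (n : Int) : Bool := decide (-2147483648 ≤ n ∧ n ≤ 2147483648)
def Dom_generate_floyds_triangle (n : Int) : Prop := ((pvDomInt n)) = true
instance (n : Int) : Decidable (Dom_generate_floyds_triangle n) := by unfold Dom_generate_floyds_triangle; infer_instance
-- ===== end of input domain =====

-- B derives each row independently from the closed-form triangular-number row start instead of A's running counter (simpler decomposition, same cost).


-- ===== PORT A =====
-- inner loop: for j in range(i): row.append(str(num)); num += 1
def floydInner (i : Int) (row : List String) (num : Int) : List String × Int :=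
  (PySem.List.pyRange 0 i 1).foldl
    (fun st _j => (st.1 ++ [PySem.Int.toStr st.2], st.2 + 1)) (row, num)

def generate_floyds_triangle (n : Int) : List String :=
  ((PySem.List.pyRange 1 (n + 1) 1).foldl
    (fun st i =>
      let inner := floydInner i [] st.2
      (st.1 ++ [PySem.Str.join " " inner.1], inner.2))
    ([], 1)).1

-- ===== PORT B =====
def floydRow (i : Int) : String :=
  let start := PySem.Int.floordiv (i * (i - 1)) 2 + 1
  PySem.Str.join " " ((PySem.List.pyRange start (start + i) 1).map PySem.Int.toStr)

def generate_floyds_triangle_alt (n : Int) : List String :=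
  (PySem.List.pyRange 1 (n + 1) 1).map floydRow

-- ===== PRECONDITION & SPEC =====
def Spec_generate_floyds_triangle (n : Int) (out : List String) : Prop := out = generate_floyds_triangle_alt n
instance (n : Int) (out : List String) : Decidable (Spec_generate_floyds_triangle n out) := by unfold Spec_generate_floyds_triangle; infer_instance

-- ===== CLAIM (what is proved, stated in full; the proofs are below) =====
def Claim_equal_generate_floyds_triangle : Prop := ∀ (n : Int), Dom_generate_floyds_triangle n → Spec_generate_floyds_triangle n (generate_floyds_triangle n)

-- ===== LEMMAS AND PROOFS =====

-- inner loop appends str(num), …, str(num+i-1) and leaves the counter at num+i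
theorem floydInner_eq (k : Nat) (row : List String) (num : Int) :
    floydInner (k : Int) row num =
      (row ++ (PySem.List.pyRange num (num + k) 1).map PySem.Int.toStr, num + k) := by
  induction k generalizing row num with
  | zero => simp [floydInner, PySem.List.pyRange_one_eq_nil]
  | succ m ih =>
    have h1 : PySem.List.pyRange 0 ((m + 1 : Nat) : Int) 1
        = PySem.List.pyRange 0 (m : Int) 1 ++ [(m : Int)] := by
      have := PySem.List.pyRange_one_succ_right (a := 0) (b := (m : Int)) (by positivity)
      push_cast
      simpa using this
    have h2 : PySem.List.pyRange num (num + ((m + 1 : Nat) : Int)) 1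
        = PySem.List.pyRange num (num + (m : Int)) 1 ++ [num + (m : Int)] := by
      have := PySem.List.pyRange_one_succ_right (a := num) (b := num + (m : Int)) (by omega)
      push_cast
      rw [show num + ((m : Int) + 1) = (num + (m : Int)) + 1 by ring] at *
      simpa using this
    have ih' := ih row num
    simp only [floydInner] at ih' ⊢
    rw [h1, List.foldl_append, ih']
    simp only [h2, List.map_append, List.map_cons, List.map_nil, List.foldl_cons,
      List.foldl_nil, Prod.mk.injEq]
    constructor
    · simp [List.append_assoc]
    · push_cast; ring

-- outer loop invariant: after rows 1..k, pattern = map floydRow (range) and num = k(k+1)/2 + 1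
theorem floydOuter_eq (k : Nat) :
    (PySem.List.pyRange 1 ((k : Int) + 1) 1).foldl
      (fun st i =>
        let inner := floydInner i [] st.2
        (st.1 ++ [PySem.Str.join " " inner.1], inner.2))
      ([], 1) =
    ((PySem.List.pyRange 1 ((k : Int) + 1) 1).map floydRow, ((k * (k + 1) / 2 : Nat) : Int) + 1) := by
  induction k with
  | zero => simp [PySem.List.pyRange_one_eq_nil]
  | succ m ih =>
    have h1 : PySem.List.pyRange 1 (((m + 1 : Nat) : Int) + 1) 1
        = PySem.List.pyRange 1 ((m : Int) + 1) 1 ++ [(m : Int) + 1] := by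
      have := PySem.List.pyRange_one_succ_right (a := 1) (b := (m : Int) + 1) (by omega)
      push_cast
      simpa using this
    have hnum : ((m * (m + 1) / 2 : Nat) : Int) + 1
        = PySem.Int.floordiv (((m : Int) + 1) * (((m : Int) + 1) - 1)) 2 + 1 := by
      have hcast : (((m : Int) + 1) * (((m : Int) + 1) - 1)) = ((m * (m + 1) : Nat) : Int) := by
        push_cast; ring
      rw [hcast, show (2:Int) = ((2:Nat):Int) from rfl, PySem.Int.floordiv_natCast]
    have hinner := floydInner_eq (m + 1) [] (((m * (m + 1) / 2 : Nat) : Int) + 1)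
    rw [h1, List.foldl_append, ih, List.map_append]
    simp only [List.foldl_cons, List.foldl_nil, List.map_cons, List.map_nil]
    have hi : ((m : Int) + 1) = (((m + 1 : Nat) : Int)) := by push_cast; ring
    rw [hi, hinner]
    simp only [List.nil_append, Prod.mk.injEq]
    constructor
    · -- the new row equals floydRow (m+1)
      congr 1
      simp only [floydRow]
      rw [← hi, ← hnum]
    · -- counter: m(m+1)/2 + 1 + (m+1) = (m+1)(m+2)/2 + 1
      have h2 : (m + 1) * (m + 1 + 1) = m * (m + 1) + 2 * (m + 1) := by ring
      have h3 : (m + 1) * (m + 1 + 1) / 2 = m * (m + 1) / 2 + (m + 1) := by omega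
      rw [h3]
      push_cast
      ring

-- ===== VERDICT (by name: the statement is the Claim_ definition above) =====
theorem generate_floyds_triangle_spec : Claim_equal_generate_floyds_triangle := by
  intro n _
  unfold Spec_generate_floyds_triangle generate_floyds_triangle generate_floyds_triangle_alt
  by_cases h : n ≤ 0
  · rw [PySem.List.pyRange_one_eq_nil (by omega)]
    simp
  · have hn : n = ((n.toNat : Int)) := by omega
    -- n > 0 here (h : ¬ n ≤ 0)
    rw [hn, floydOuter_eq n.toNat]
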